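-- pv_equiv track=rewrite | github.com/josh5734/Programmers-PS | Programmers_무지의먹방라이브.py | solution
-- ===== SOURCE A (Python) =====
-- def solution(food_times, k):
--     foods = []
--     for idx, food_amount in enumerate(food_times):
--         foods.append([food_amount, idx+1])
--
--     foods.sort()  # 음식 양이 적은 순서대로 정렬 - 배열 길이에 영향을 주기 때문
--     if sum(food_times) <= k:  # k가 전체 음식 양보다 크거나 같으면 -1
--         return -1
--
--     minFoodAmount = foods[0][0]
--     length = len(foods)
--     oneCycleTime = minFoodAmount * length  # oneCycleTime이 되면 음식이 하나 사라짐
--     nextFoodIdx = 1  # 두번째에 있는 음식이 1초 후에 사라지므로 1로 두번째 음식을 가리키도록 초기화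
--     while oneCycleTime <= k:  # 더 이상 사라지는 음식이 없으면 loop 종료
--         k -= oneCycleTime
--         minFoodAmount = foods[nextFoodIdx][0] - foods[nextFoodIdx-1][0]
--         length -= 1
--         oneCycleTime = minFoodAmount * length
--         nextFoodIdx += 1
--     foods = foods[nextFoodIdx-1:]  # 지금까지 다 먹은 음식 제거
--     foods = sorted(foods, key=lambda x: x[1])  # 다시 원래 인덱스순으로 정렬
--     idx = k % len(foods)  # 남은 음식들 중에서 k번째 구하기
--     return foods[idx][1]
-- ===== SOURCE B (Python) =====
-- def solution(food_times, k):
--     n = len(food_times)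
--     if sum(food_times) <= k:
--         return -1
--     pairs = sorted([(a, i + 1) for i, a in enumerate(food_times)])
--     pref = [0]
--     prev = 0
--     for m in range(1, n):
--         pref.append(pref[-1] + (pairs[m - 1][0] - prev) * (n - (m - 1)))
--         prev = pairs[m - 1][0]
--     lo, hi = 0, n - 1
--     while lo < hi:
--         mid = (lo + hi + 1) // 2
--         if pref[mid] <= k:
--             lo = mid
--         else:
--             hi = mid - 1
--     rest = sorted(p[1] for p in pairs[lo:])
--     return rest[(k - pref[lo]) % len(rest)]
-- ===== Notes on version B (the rewrite author's own statement) =====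
-- stated objective: alternative
-- what changed: Replaces A's step-by-step layer-subtraction while-loop with a cumulative-time prefix array built once plus a binary search for the last fully-consumable layer; the -1 guard and the final index-sorted lookup are kept.
import Mathlib
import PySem

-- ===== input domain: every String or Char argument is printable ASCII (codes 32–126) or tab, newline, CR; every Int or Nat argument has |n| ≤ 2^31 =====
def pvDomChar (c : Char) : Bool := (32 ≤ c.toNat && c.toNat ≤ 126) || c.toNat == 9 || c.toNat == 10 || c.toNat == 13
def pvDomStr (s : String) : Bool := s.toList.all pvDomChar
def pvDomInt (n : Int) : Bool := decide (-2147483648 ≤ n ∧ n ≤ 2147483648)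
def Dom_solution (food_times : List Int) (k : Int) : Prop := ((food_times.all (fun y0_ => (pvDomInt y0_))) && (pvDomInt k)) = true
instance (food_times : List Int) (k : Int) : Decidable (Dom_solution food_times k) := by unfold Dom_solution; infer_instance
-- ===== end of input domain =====

-- B replaces A's layer-by-layer subtraction while-loop by a prefix array of cumulative
-- layer times plus a binary search for the last fully-consumable layer (alternative
-- decomposition; both remain O(n log n) overall, the sort dominating).

-- ===== PORT A =====
-- A's while-loop; fuel = len(foods) bounds its iteration count (inside Pre_ the loop
-- runs at most len(foods) - 1 times, so the fuel never runs out there).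
def solLoopA (foods : List (Int × Int)) : Nat → Int → Int → Int → Int → Int × Int
  | 0, k, _, _, nfi => (k, nfi)
  | fuel+1, k, oct, len, nfi =>
    if oct ≤ k then
      let minf := (PySem.List.pyGetD foods nfi ((0:Int),(0:Int))).1
                  - (PySem.List.pyGetD foods (nfi-1) ((0:Int),(0:Int))).1
      solLoopA foods fuel (k - oct) (minf * (len - 1)) (len - 1) (nfi + 1)
    else (k, nfi)

def solution (food_times : List Int) (k : Int) : Int :=
  let foods0 := (PySem.List.enumerate food_times 0).foldl
    (fun acc p => acc ++ [(p.2, p.1 + 1)]) []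
  let foods := PySem.List.sorted2 foods0 (fun x => x.1) (fun x => x.2)
  if food_times.sum ≤ k then -1
  else
    let minFoodAmount := (PySem.List.pyGetD foods 0 ((0:Int),(0:Int))).1
    let length : Int := foods.length
    let st := solLoopA foods foods.length k (minFoodAmount * length) length 1
    let foods2 := PySem.List.sorted (PySem.List.slice foods (some (st.2 - 1)) none) (fun x => x.2)
    let idx := PySem.Int.mod st.1 (foods2.length)
    (PySem.List.pyGetD foods2 idx ((0:Int),(0:Int))).2

-- ===== PORT B =====
-- B's binary search; hi - lo strictly shrinks each iteration, so fuel = len(food_times)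
-- (> initial hi - lo) is never exhausted.
def bsLoopB (pref : List Int) (k : Int) : Nat → Int → Int → Int
  | 0, lo, _ => lo
  | fuel+1, lo, hi =>
    if lo < hi then
      let mid := PySem.Int.floordiv (lo + hi + 1) 2
      if PySem.List.pyGetD pref mid 0 ≤ k then bsLoopB pref k fuel mid hi
      else bsLoopB pref k fuel lo (mid - 1)
    else lo

def solution_alt (food_times : List Int) (k : Int) : Int :=
  let n : Int := food_times.length
  if food_times.sum ≤ k then -1
  else
    let pairs := PySem.List.sorted2
      ((PySem.List.enumerate food_times 0).map (fun p => (p.2, p.1 + 1)))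
      (fun x => x.1) (fun x => x.2)
    let st := (PySem.List.pyRange 1 n 1).foldl
      (fun (s : List Int × Int) m =>
        (s.1 ++ [PySem.List.pyGetD s.1 (-1) 0
                  + ((PySem.List.pyGetD pairs (m-1) ((0:Int),(0:Int))).1 - s.2) * (n - (m - 1))],
         (PySem.List.pyGetD pairs (m-1) ((0:Int),(0:Int))).1))
      (([0] : List Int), (0:Int))
    let pref := st.1
    let lo := bsLoopB pref k food_times.length 0 (n - 1)
    let rest := PySem.List.sorted ((PySem.List.slice pairs (some lo) none).map (fun p => p.2)) (fun x => x)
    PySem.List.pyGetD rest (PySem.Int.mod (k - PySem.List.pyGetD pref lo 0) (rest.length)) 0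

-- ===== PRECONDITION & SPEC =====
-- Pre_ excludes only the inputs where A raises IndexError (empty food_times with
-- k < 0, reaching foods[0] past the -1 guard); B raises there too (ZeroDivisionError).
def Pre_solution (food_times : List Int) (k : Int) : Prop :=
  food_times ≠ [] ∨ 0 ≤ k
instance (food_times : List Int) (k : Int) : Decidable (Pre_solution food_times k) := by
  unfold Pre_solution; infer_instance

def pvWitness_solution : List Int × Int := ([3, 1, 2], 5)

def Spec_solution (food_times : List Int) (k : Int) (out : Int) : Prop := out = solution_alt food_times k
instance (food_times : List Int) (k : Int) (out : Int) : Decidable (Spec_solution food_times k out) := by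
  unfold Spec_solution; infer_instance

-- ===== CLAIM (what is proved, stated in full; the proofs are below) =====
def Claim_equal_solution : Prop := ∀ (food_times : List Int) (k : Int), Dom_solution food_times k → Pre_solution food_times k → Spec_solution food_times k (solution food_times k)

-- ===== LEMMAS AND PROOFS =====

-- sorted amounts / layer cost / cumulative prefix
def pvC (S : List Int) (t : Nat) : Int :=
  (S.getD t 0 - if t = 0 then 0 else S.getD (t-1) 0) * ((S.length : Int) - (t : Int))

def pvP (S : List Int) : Nat → Int
  | 0 => 0
  | m+1 => pvP S m + pvC S m

theorem insertBy_pairwise {α : Type} (R : α → α → Prop) (before : α → α → Bool)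
    (htot : ∀ a b, before a b = true → R a b) (hfal : ∀ a b, before a b = false → R b a)
    (htrans : ∀ a b c, R a b → R b c → R a c) (x : α) :
    ∀ (ys : List α), ys.Pairwise R → (PySem.List.insertBy before x ys).Pairwise R
  | [], _ => by simp [PySem.List.insertBy]
  | y :: ys, h => by
    rw [List.pairwise_cons] at h
    by_cases hb : before x y = true
    · simp only [PySem.List.insertBy, hb, if_true]
      refine List.Pairwise.cons ?_ (List.Pairwise.cons h.1 h.2)
      intro z hz
      rcases List.mem_cons.mp hz with rfl | hz
      · exact htot _ _ hb
      · exact htrans _ _ _ (htot _ _ hb) (h.1 z hz)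
    · simp only [PySem.List.insertBy, hb]
      refine List.Pairwise.cons ?_ (insertBy_pairwise R before htot hfal htrans x ys h.2)
      intro z hz
      rcases (PySem.List.mem_insertBy before x z ys).mp hz with rfl | hz
      · exact hfal _ _ (Bool.eq_false_iff.mpr hb)
      · exact h.1 z hz

theorem foldl_insertBy_pairwise {α : Type} (R : α → α → Prop) (before : α → α → Bool)
    (htot : ∀ a b, before a b = true → R a b) (hfal : ∀ a b, before a b = false → R b a)
    (htrans : ∀ a b c, R a b → R b c → R a c) :
    ∀ (l acc : List α), acc.Pairwise R →
      (l.foldl (fun acc x => PySem.List.insertBy before x acc) acc).Pairwise R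
  | [], acc, h => h
  | x :: l, acc, h => by
    simpa using foldl_insertBy_pairwise R before htot hfal htrans l
      (PySem.List.insertBy before x acc) (insertBy_pairwise R before htot hfal htrans x acc h)

theorem sorted2_pairwise_fst (xs : List (Int × Int)) :
    (PySem.List.sorted2 xs (fun x => x.1) (fun x => x.2)).Pairwise (fun a b => a.1 ≤ b.1) := by
  unfold PySem.List.sorted2
  simp only [Bool.false_eq_true, if_false]
  exact foldl_insertBy_pairwise _ _
    (by intro a b h; simp at h; rcases h with h | ⟨h, _⟩ <;> omega)
    (by intro a b h; simp at h; omega)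
    (by intro a b c h1 h2; omega) xs [] (List.Pairwise.nil)

theorem getD_mono_of_pairwise (S : List Int) (h : S.Pairwise (· ≤ ·)) {i j : Nat}
    (hij : i ≤ j) (hj : j < S.length) : S.getD i 0 ≤ S.getD j 0 := by
  rcases Nat.lt_or_ge i j with hlt | hge
  · have := (List.pairwise_iff_getElem.mp h) i j (lt_trans hlt hj) hj hlt
    rwa [List.getD_eq_getElem _ _ (lt_trans hlt hj), List.getD_eq_getElem _ _ hj]
  · have : i = j := le_antisymm hij hge
    simp [this]

theorem pvC_nonneg (S : List Int) (h : S.Pairwise (· ≤ ·)) {t : Nat}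
    (ht1 : 1 ≤ t) (ht : t < S.length) : 0 ≤ pvC S t := by
  have h1 : S.getD (t-1) 0 ≤ S.getD t 0 := getD_mono_of_pairwise S h (by omega) ht
  have h2 : (0:Int) ≤ (S.length : Int) - (t : Int) := by
    have : (t:Int) < (S.length : Int) := by exact_mod_cast ht
    omega
  unfold pvC
  rw [if_neg (by omega)]
  exact mul_nonneg (by omega) h2

theorem pvP_mono (S : List Int) (h : S.Pairwise (· ≤ ·)) {j j' : Nat}
    (hj1 : 1 ≤ j) (hjj : j ≤ j') (hj' : j' ≤ S.length) : pvP S j ≤ pvP S j' := by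
  induction j', hjj using Nat.le_induction with
  | base => exact le_rfl
  | succ m hm ih =>
    have : pvP S m ≤ pvP S (m+1) := by
      have := pvC_nonneg S h (t := m) (by omega) (by omega)
      simp [pvP]; omega
    exact le_trans (ih (by omega)) this

theorem pvP_closed (S : List Int) : ∀ m, 1 ≤ m → m ≤ S.length →
    pvP S m = ((List.range (m-1)).map (fun t => S.getD t 0)).sum
              + S.getD (m-1) 0 * ((S.length : Int) - ((m:Nat) - 1 : Nat)) := by
  intro m
  induction m with
  | zero => omega
  | succ m ih =>
    intro _ hm
    rcases Nat.eq_zero_or_pos m with rfl | hmpos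
    · simp [pvP, pvC]
    · have hrec := ih hmpos (by omega)
      have hstep : pvP S (m+1) = pvP S m + pvC S m := rfl
      rw [hstep, hrec]
      unfold pvC
      rw [if_neg (by omega)]
      have hr : List.range m = List.range (m-1) ++ [m-1] := by
        conv_lhs => rw [show m = (m-1) + 1 by omega]
        rw [List.range_succ]
      simp only [Nat.add_sub_cancel, hr, List.map_append, List.sum_append, List.map_cons,
        List.map_nil, List.sum_cons, List.sum_nil]
      push_cast [Nat.cast_sub hmpos]
      ring

theorem range_map_getD (S : List Int) : (List.range S.length).map (fun t => S.getD t 0) = S := by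
  apply List.ext_getElem
  · simp
  · intro i h1 h2
    simp [List.getD_eq_getElem?_getD, List.getElem?_eq_getElem h2]

theorem pvP_length (S : List Int) (hS : S ≠ []) : pvP S S.length = S.sum := by
  have hn : 1 ≤ S.length := List.length_pos_iff.mpr hS
  rw [pvP_closed S S.length hn le_rfl]
  have h1 : ((S.length : Nat) - 1 : Nat) = S.length - 1 := rfl
  have h2 : ((S.length : Int) - ((S.length - 1 : Nat) : Int)) = 1 := by
    have : ((S.length - 1 : Nat) : Int) = (S.length : Int) - 1 := by omega
    omega
  rw [h2, mul_one]
  have hr : List.range S.length = List.range (S.length - 1) ++ [S.length - 1] := by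
    conv_lhs => rw [show S.length = (S.length - 1) + 1 by omega]
    rw [List.range_succ]
  conv_rhs => rw [← range_map_getD S]
  rw [hr]
  simp

theorem fst_pyGetD (pairs : List (Int × Int)) (i : Int) :
    (PySem.List.pyGetD pairs i ((0:Int),(0:Int))).1
      = PySem.List.pyGetD (pairs.map (fun p => p.1)) i 0 := by
  have := PySem.List.pyGetD_map (fun p : Int × Int => p.1) pairs i ((0:Int),(0:Int))
  simpa using this.symm

theorem loopA_run (pairs : List (Int × Int)) (k : Int) (S : List Int)
    (hS : S = pairs.map (fun p => p.1))
    (M : Nat) (hMspec : k < pvP S (M+1)) (hMmin : ∀ i, i < M → pvP S (i+1) ≤ k) :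
    ∀ (fuel i : Nat), i ≤ M → M - i < fuel →
      solLoopA pairs fuel (k - pvP S i) (pvC S i) ((pairs.length : Int) - (i:Int)) ((i:Int)+1)
        = (k - pvP S M, (M:Int)+1) := by
  have hlen : S.length = pairs.length := by simp [hS]
  intro fuel
  induction fuel with
  | zero => intro i _ h; omega
  | succ fuel ih =>
    intro i hiM hfuel
    rcases Nat.eq_or_lt_of_le hiM with rfl | hlt
    · -- i = M : loop condition fails
      have hcond : ¬ (pvC S i ≤ k - pvP S i) := by
        have : pvP S (i+1) = pvP S i + pvC S i := rfl
        omega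
      simp only [solLoopA, if_neg hcond]
    · -- i < M : one more iteration
      have hcond : pvC S i ≤ k - pvP S i := by
        have h1 := hMmin i hlt
        have : pvP S (i+1) = pvP S i + pvC S i := rfl
        omega
      simp only [solLoopA, if_pos hcond]
      have e1 : ((i:Int) + 1) = ((i+1 : Nat) : Int) := by push_cast; ring
      have e2 : ((i:Int) + 1 - 1) = ((i : Nat) : Int) := by omega
      have hminf : (PySem.List.pyGetD pairs ((i:Int)+1) ((0:Int),(0:Int))).1
          - (PySem.List.pyGetD pairs ((i:Int)+1-1) ((0:Int),(0:Int))).1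
          = S.getD (i+1) 0 - S.getD i 0 := by
        rw [e1, show ((i+1:Nat):Int) - 1 = ((i:Nat):Int) by omega,
          fst_pyGetD, fst_pyGetD, ← hS,
          PySem.List.pyGetD_natCast, PySem.List.pyGetD_natCast]
      rw [hminf]
      have harg1 : k - pvP S i - pvC S i = k - pvP S (i+1) := by
        have : pvP S (i+1) = pvP S i + pvC S i := rfl
        omega
      have harg2 : (S.getD (i+1) 0 - S.getD i 0) * ((pairs.length : Int) - (i:Int) - 1)
          = pvC S (i+1) := by
        unfold pvC
        rw [if_neg (by omega), hlen]
        push_cast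
        ring_nf
      have harg3 : ((i:Int) + 1 + 1) = (((i+1 : Nat)) : Int) + 1 := by push_cast; ring
      rw [harg1, harg2, show (pairs.length : Int) - (i:Int) - 1 = (pairs.length : Int) - ((i+1:Nat):Int) by push_cast; ring, harg3]
      exact ih (i+1) (by omega) (by omega)

theorem prefFold_run (pairs : List (Int × Int)) (S : List Int)
    (hS : S = pairs.map (fun p => p.1)) (N : Int) (hN : N = (S.length : Int)) :
    ∀ j : Nat, 1 ≤ j → j ≤ S.length →
      (PySem.List.pyRange 1 (j:Int)).foldl
        (fun (s : List Int × Int) m =>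
          (s.1 ++ [PySem.List.pyGetD s.1 (-1) 0
                    + ((PySem.List.pyGetD pairs (m-1) ((0:Int),(0:Int))).1 - s.2) * (N - (m - 1))],
           (PySem.List.pyGetD pairs (m-1) ((0:Int),(0:Int))).1))
        (([0] : List Int), (0:Int))
      = ((List.range j).map (pvP S), if j = 1 then 0 else S.getD (j-2) 0) := by
  intro j hj1
  induction j, hj1 using Nat.le_induction with
  | base =>
    intro _
    rw [show ((1:Nat):Int) = 1 by norm_num, show PySem.List.pyRange 1 1 = [] by simp [PySem.List.pyRange]]
    simp [pvP, List.range_succ]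
  | succ j hj ih =>
    intro hle
    obtain ⟨jj, rfl⟩ : ∃ jj, j = jj + 1 := ⟨j-1, by omega⟩
    rw [PySem.List.pyRange_one_append 1 ((jj+1:Nat):Int) (((jj+1)+1:Nat):Int) (by push_cast; omega) (by push_cast; omega),
      show PySem.List.pyRange ((jj+1:Nat):Int) (((jj+1)+1:Nat):Int) = [((jj+1:Nat):Int)] by
        rw [PySem.List.pyRange_one_cons (by push_cast; omega)]
        rw [show ((jj+1:Nat):Int) + 1 = (((jj+1)+1:Nat):Int) by push_cast; ring]
        simp [PySem.List.pyRange],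
      List.foldl_append, ih (by omega)]
    simp only [List.foldl_cons, List.foldl_nil]
    have hne : (List.range (jj+1)).map (pvP S) ≠ [] := by simp
    have hlast : PySem.List.pyGetD ((List.range (jj+1)).map (pvP S)) (-1) 0 = pvP S jj := by
      rw [PySem.List.pyGetD_neg_one _ _ hne, List.getLast_eq_getElem]
      simp
    have hidx : ((jj+1:Nat):Int) - 1 = ((jj:Nat):Int) := by push_cast; ring
    have hpair : (PySem.List.pyGetD pairs (((jj+1:Nat):Int) - 1) ((0:Int),(0:Int))).1 = S.getD jj 0 := by
      rw [hidx, fst_pyGetD, ← hS, PySem.List.pyGetD_natCast]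
    rw [hlast, hpair]
    have hX : pvP S jj + (S.getD jj 0 - (if jj + 1 = 1 then 0 else S.getD (jj+1-2) 0))
        * (N - (((jj+1:Nat):Int) - 1)) = pvP S (jj+1) := by
      show _ = pvP S jj + pvC S jj
      unfold pvC
      rcases Nat.eq_zero_or_pos jj with rfl | hpos
      · simp [hN]
      · rw [if_neg (by omega), if_neg (by omega), hidx, hN]
        simp
    rw [hX]
    simp [List.range_succ]

theorem bsLoopB_run (S : List Int) (k : Int) (M n : Nat)
    (hpat : ∀ j : Nat, 1 ≤ j → j ≤ n-1 → (pvP S j ≤ k ↔ j ≤ M)) :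
    ∀ (fuel : Nat) (lo hi : Nat), lo ≤ M → M ≤ hi → hi ≤ n-1 → hi - lo < fuel →
      bsLoopB ((List.range n).map (pvP S)) k fuel (lo:Int) (hi:Int) = (M:Int) := by
  have hget : ∀ m : Nat, m < n →
      PySem.List.pyGetD ((List.range n).map (pvP S)) ((m:Nat):Int) 0 = pvP S m := by
    intro m hm
    rw [PySem.List.pyGetD_natCast]
    simp [List.getD_eq_getElem?_getD, hm]
  intro fuel
  induction fuel with
  | zero => intro lo hi _ _ _ h; omega
  | succ fuel ih =>
    intro lo hi hloM hMhi hhin hfuel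
    by_cases hlh : lo < hi
    · have hcond : ((lo:Nat):Int) < ((hi:Nat):Int) := by exact_mod_cast hlh
      simp only [bsLoopB, if_pos hcond]
      have hmid : PySem.Int.floordiv (((lo:Nat):Int) + ((hi:Nat):Int) + 1) 2
          = (((lo + hi + 1) / 2 : Nat) : Int) := by
        rw [show ((lo:Nat):Int) + ((hi:Nat):Int) + 1 = ((lo + hi + 1 : Nat) : Int) by push_cast; ring]
        exact_mod_cast PySem.Int.floordiv_natCast (lo + hi + 1) 2
      set m := (lo + hi + 1) / 2 with hm
      have hm1 : lo < m := by omega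
      have hm2 : m ≤ hi := by omega
      rw [hmid, hget m (by omega)]
      by_cases hv : pvP S m ≤ k
      · rw [if_pos hv]
        have hmM : m ≤ M := (hpat m (by omega) (by omega)).mp hv
        exact ih m hi hmM hMhi hhin (by omega)
      · rw [if_neg hv]
        have hMm : M ≤ m - 1 := by
          by_contra hc
          exact hv ((hpat m (by omega) (by omega)).mpr (by omega))
        rw [show ((m:Nat):Int) - 1 = ((m - 1 : Nat) : Int) by omega]
        exact ih lo (m-1) hloM hMm (by omega) (by omega)
    · have : lo = M ∧ hi = M := by omega
      have hcond : ¬ ((lo:Nat):Int) < ((hi:Nat):Int) := by exact_mod_cast hlh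
      simp only [bsLoopB, if_neg hcond]
      exact_mod_cast congrArg (Nat.cast : Nat → Int) this.1


theorem claim_equal_proof : ∀ (food_times : List Int) (k : Int),
    Pre_solution food_times k → solution food_times k = solution_alt food_times k := by
  intro ft k hpre
  by_cases hg : ft.sum ≤ k
  · simp [solution, solution_alt, hg]
  · have hft : ft ≠ [] := by
      rcases hpre with h | h
      · exact h
      · intro hnil; rw [hnil] at hg; simp at hg; omega
    have hn : 1 ≤ ft.length := by
      cases ft with
      | nil => exact absurd rfl hft
      | cons a l => simp
    -- shared structures
    set E : List (Int × Int) := (PySem.List.enumerate ft 0).map (fun p => (p.2, p.1 + 1)) with hE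
    set pairs : List (Int × Int) := PySem.List.sorted2 E (fun x => x.1) (fun x => x.2) with hpairs
    set S : List Int := pairs.map (fun p => p.1) with hSdef
    have hperm : pairs.Perm E := PySem.List.sorted2_perm E _ _ _
    have hlenE : E.length = ft.length := by simp [hE, PySem.List.length_enumerate]
    have hlenP : pairs.length = ft.length := by rw [hperm.length_eq, hlenE]
    have hlenS : S.length = ft.length := by simp [hSdef, hlenP]
    have hmapE : E.map (fun p => p.1) = ft := by
      rw [hE, List.map_map]
      exact PySem.List.map_snd_enumerate ft 0
    have hsum : S.sum = ft.sum := by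
      rw [hSdef, ← hmapE]
      exact (hperm.map _).sum_eq
    have hpairw : S.Pairwise (· ≤ ·) :=
      (sorted2_pairwise_fst E).map _ (fun a b h => h)
    have hSne : S ≠ [] := by
      intro h; rw [h] at hlenS; simp at hlenS; omega
    have hex : ∃ m, k < pvP S (m+1) := by
      refine ⟨ft.length - 1, ?_⟩
      rw [show ft.length - 1 + 1 = S.length by omega, pvP_length S hSne, hsum]
      omega
    set M := Nat.find hex with hM
    have hMspec : k < pvP S (M+1) := Nat.find_spec hex
    have hMmin : ∀ i, i < M → pvP S (i+1) ≤ k := fun i hi => not_lt.mp (Nat.find_min hex hi)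
    have hMle : M ≤ ft.length - 1 := Nat.find_le (by
      rw [show ft.length - 1 + 1 = S.length by omega, pvP_length S hSne, hsum]; omega)
    have hpat : ∀ j : Nat, 1 ≤ j → j ≤ ft.length - 1 → (pvP S j ≤ k ↔ j ≤ M) := by
      intro j hj1 hj2
      constructor
      · intro hv
        by_contra hc
        have h1 : pvP S (M+1) ≤ pvP S j :=
          pvP_mono S hpairw (by omega) (by omega) (by omega)
        omega
      · intro hv
        have := hMmin (j-1) (by omega)
        rwa [show j - 1 + 1 = j by omega] at this
    -- A side
    have hA : solution ft k
        = (PySem.List.pyGetD (PySem.List.sorted (pairs.drop M) (fun x => x.2))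
            (PySem.Int.mod (k - pvP S M)
              (((PySem.List.sorted (pairs.drop M) (fun x => x.2)).length : Int)))
            ((0:Int),(0:Int))).2 := by
      simp only [solution, PySem.List.foldl_append_singleton_eq_map, List.nil_append, if_neg hg]
      rw [← hE, ← hpairs]
      have h0 : (PySem.List.pyGetD pairs 0 ((0:Int),(0:Int))).1 * (pairs.length:Int) = pvC S 0 := by
        rw [fst_pyGetD pairs 0, ← hSdef, PySem.List.pyGetD_zero]
        unfold pvC
        simp [hlenS, hlenP]
      rw [h0]
      have hloop := loopA_run pairs k S hSdef M hMspec hMmin pairs.length 0 (by omega) (by omega)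
      norm_num [pvP] at hloop
      rw [hloop]
      rw [show ((M:Int) + 1 - 1) = ((M:Nat):Int) by ring, PySem.List.slice_from_natCast]
    -- B side
    have hB : solution_alt ft k
        = PySem.List.pyGetD (PySem.List.sorted ((pairs.drop M).map (fun p => p.2)) (fun x => x))
            (PySem.Int.mod (k - pvP S M)
              (((PySem.List.sorted ((pairs.drop M).map (fun p => p.2)) (fun x => x)).length : Int)))
            0 := by
      simp only [solution_alt, if_neg hg]
      rw [← hE, ← hpairs]
      rw [prefFold_run pairs S hSdef ((ft.length:Nat):Int) (by rw [hlenS]) ft.length hn (by omega)]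
      have hbs : bsLoopB ((List.range ft.length).map (pvP S)) k ft.length 0 (((ft.length:Nat):Int) - 1) = ((M:Nat):Int) := by
        rw [show (0:Int) = ((0:Nat):Int) by norm_num,
          show ((ft.length:Nat):Int) - 1 = ((ft.length - 1 : Nat):Int) by omega]
        exact bsLoopB_run S k M ft.length hpat ft.length 0 (ft.length - 1) (by omega) hMle (by omega) (by omega)
      rw [hbs]
      rw [PySem.List.slice_from_natCast]
      have hgetM : PySem.List.pyGetD ((List.range ft.length).map (pvP S)) ((M:Nat):Int) 0 = pvP S M := by
        rw [PySem.List.pyGetD_natCast]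
        simp [List.getD_eq_getElem?_getD, show M < ft.length by omega]
      rw [hgetM]
    -- convergence of the two tails
    have hrest : PySem.List.sorted ((pairs.drop M).map (fun p => p.2)) (fun x => x)
        = (PySem.List.sorted (pairs.drop M) (fun x => x.2)).map (fun p => p.2) :=
      PySem.List.sorted_id_eq_of_perm_of_pairwise _ _
        ((PySem.List.sorted_perm _ _ _).map _)
        ((PySem.List.sorted_pairwise _ _).map _ (fun a b h => h))
    rw [hA, hB, hrest]
    have hval := PySem.List.pyGetD_map (fun p : Int × Int => p.2)
      (PySem.List.sorted (pairs.drop M) (fun x => x.2))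
      (PySem.Int.mod (k - pvP S M)
        ((((PySem.List.sorted (pairs.drop M) (fun x => x.2)).map (fun p => p.2)).length : Int)))
      ((0:Int),(0:Int))
    simp only [List.length_map] at hval ⊢
    exact hval.symm

-- ===== VERDICT (by name: the statement is the Claim_ definition above) =====
theorem solution_spec : Claim_equal_solution := by
  intro food_times k _hdom hpre
  unfold Spec_solution
  exact claim_equal_proof food_times k hpre
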